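-- pv_equiv track=rewrite | github.com/nilAIbot/lead_generator | main.py | detect_trigger
-- ===== SOURCE A (Python) =====
-- TRIGGER_KEYWORDS = {
--     "funding": ["seed", "pre-seed", "series a", "series b", "venture funding", "raised", "funding", "round"],
--     "launch": ["launched", "launching", "product hunt", "beta", "v1", "public launch", "go live"],
--     "hiring_freeze": ["hiring freeze", "budget freeze", "cost cutting", "contractors only", "backfill with contractors"],
--     "scale_up": ["scale", "scaling", "increasing demand", "rapid growth", "high growth"],
--     "deadline": ["deadline", "urgent", "immediately", "asap", "deliver by", "time sensitive"],
-- }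
--
-- def detect_trigger(text):
--     t = (text or "").lower()
--     hits = []
--     for label, kws in TRIGGER_KEYWORDS.items():
--         if any(k in t for k in kws):
--             hits.append(label.replace("_"," "))
--     order = ["funding","launch","hiring freeze","scale up","deadline"]
--     if hits:
--         hits_sorted = sorted(hits, key=lambda x: order.index(x) if x in order else 99)
--         return hits_sorted[0]
--     return None
-- ===== SOURCE B (Python) =====
-- TRIGGER_PRIORITY = [
--     ("funding", ["seed", "pre-seed", "series a", "series b", "venture funding", "raised", "funding", "round"]),
--     ("launch", ["launched", "launching", "product hunt", "beta", "v1", "public launch", "go live"]),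
--     ("hiring freeze", ["hiring freeze", "budget freeze", "cost cutting", "contractors only", "backfill with contractors"]),
--     ("scale up", ["scale", "scaling", "increasing demand", "rapid growth", "high growth"]),
--     ("deadline", ["deadline", "urgent", "immediately", "asap", "deliver by", "time sensitive"]),
-- ]
--
-- def detect_trigger(text):
--     t = (text or "").lower()
--     for label, kws in TRIGGER_PRIORITY:
--         if any(k in t for k in kws):
--             return label
--     return None
-- ===== Notes on version B (the rewrite author's own statement) =====
-- stated objective: simpler
-- what changed: Replaces the collect-all-hits, label.replace, and sorted-by-priority-index pass with a single early-returning scan over a priority-ordered list of (label, keywords) pairs, eliminating the hits list and the sort.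
import Mathlib
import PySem

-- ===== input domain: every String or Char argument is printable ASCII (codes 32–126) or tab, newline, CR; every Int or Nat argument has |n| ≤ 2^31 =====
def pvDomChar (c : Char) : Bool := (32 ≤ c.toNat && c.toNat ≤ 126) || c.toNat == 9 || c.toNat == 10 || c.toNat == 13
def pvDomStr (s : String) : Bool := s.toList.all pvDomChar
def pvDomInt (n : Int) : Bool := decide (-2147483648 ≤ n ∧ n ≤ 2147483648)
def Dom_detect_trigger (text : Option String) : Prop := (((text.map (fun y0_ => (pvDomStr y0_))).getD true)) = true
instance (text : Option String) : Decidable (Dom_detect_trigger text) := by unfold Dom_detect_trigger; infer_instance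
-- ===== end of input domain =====

-- B replaces the collect-hits-then-sort pass of A with a single early-returning
-- scan over a priority-ordered (label, keywords) list; objective: simpler.


-- shared keyword constants (module-level data in both Pythons)
def kwFunding : List String := ["seed", "pre-seed", "series a", "series b", "venture funding", "raised", "funding", "round"]
def kwLaunch : List String := ["launched", "launching", "product hunt", "beta", "v1", "public launch", "go live"]
def kwHiringFreeze : List String := ["hiring freeze", "budget freeze", "cost cutting", "contractors only", "backfill with contractors"]
def kwScaleUp : List String := ["scale", "scaling", "increasing demand", "rapid growth", "high growth"]
def kwDeadline : List String := ["deadline", "urgent", "immediately", "asap", "deliver by", "time sensitive"]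

-- ===== PORT A =====
-- TRIGGER_KEYWORDS as an association list in insertion order
def TRIGGER_KEYWORDS : List (String × List String) :=
  [("funding", kwFunding), ("launch", kwLaunch), ("hiring_freeze", kwHiringFreeze),
   ("scale_up", kwScaleUp), ("deadline", kwDeadline)]

def detect_trigger (text : Option String) : Option String :=
  let t := PySem.Str.lower (text.getD "")
  let hits := TRIGGER_KEYWORDS.foldl
    (fun hits lk =>
      if lk.2.any (fun k => PySem.Str.isIn k t) then
        hits ++ [PySem.Str.replace lk.1 "_" " "]
      else hits) []
  let order : List String := ["funding", "launch", "hiring freeze", "scale up", "deadline"]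
  if hits ≠ [] then
    let hits_sorted := PySem.List.sorted hits
      (fun x => if order.contains x then ((PySem.List.index? order x).getD 99 : Int) else 99) false
    PySem.List.pyGet? hits_sorted 0
  else none

-- ===== PORT B =====
def TRIGGER_PRIORITY : List (String × List String) :=
  [("funding", kwFunding), ("launch", kwLaunch), ("hiring freeze", kwHiringFreeze),
   ("scale up", kwScaleUp), ("deadline", kwDeadline)]

def firstTrigger (t : String) : List (String × List String) → Option String
  | [] => none
  | (label, kws) :: rest =>
      if kws.any (fun k => PySem.Str.isIn k t) then some label
      else firstTrigger t rest

def detect_trigger_alt (text : Option String) : Option String :=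
  let t := PySem.Str.lower (text.getD "")
  firstTrigger t TRIGGER_PRIORITY

-- ===== PRECONDITION & SPEC =====
def Spec_detect_trigger (text : Option String) (out : Option String) : Prop := out = detect_trigger_alt text
instance (text : Option String) (out : Option String) : Decidable (Spec_detect_trigger text out) := by unfold Spec_detect_trigger; infer_instance

-- ===== CLAIM (what is proved, stated in full; the proofs are below) =====
def Claim_equal_detect_trigger : Prop := ∀ (text : Option String), Dom_detect_trigger text → Spec_detect_trigger text (detect_trigger text)

-- ===== LEMMAS AND PROOFS =====

-- Both ports depend on the text only through the five keyword-hit booleans: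
-- once those are fixed, everything left is a closed computation, so we case on them.
theorem detect_trigger_eq_alt (text : Option String) :
    detect_trigger text = detect_trigger_alt text := by
  unfold detect_trigger detect_trigger_alt
  set t := PySem.Str.lower (text.getD "") with ht
  by_cases h1 : kwFunding.any (fun k => PySem.Str.isIn k t) <;>
  by_cases h2 : kwLaunch.any (fun k => PySem.Str.isIn k t) <;>
  by_cases h3 : kwHiringFreeze.any (fun k => PySem.Str.isIn k t) <;>
  by_cases h4 : kwScaleUp.any (fun k => PySem.Str.isIn k t) <;>
  by_cases h5 : kwDeadline.any (fun k => PySem.Str.isIn k t) <;>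
    simp only [TRIGGER_KEYWORDS, TRIGGER_PRIORITY, List.foldl, firstTrigger,
      h1, h2, h3, h4, h5, if_true, if_false, Bool.false_eq_true] <;>
    decide

-- ===== VERDICT (by name: the statement is the Claim_ definition above) =====
theorem detect_trigger_spec : Claim_equal_detect_trigger := by
  intro text _
  unfold Spec_detect_trigger
  exact detect_trigger_eq_alt text
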